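-- pv_equiv track=rewrite | github.com/SimonBrandner/gem-cpp | report/scripts/plotter.py | corner_start_stop
-- ===== SOURCE A (Python) =====
-- def corner_start_stop(start_stops: list[tuple[int, int]] = []) -> tuple[int, int]:
--     lower_start = None
--     biggest_stop = None
--     for start, stop in start_stops:
--         if lower_start is None or start < lower_start:
--             lower_start = start
--         if biggest_stop is None or stop > biggest_stop:
--             biggest_stop = stop
--
--     if lower_start is None or biggest_stop is None:
--         raise Exception("No lowest or biggest stop")
--     return (lower_start, biggest_stop)
-- ===== SOURCE B (Python) =====
-- def corner_start_stop(start_stops: list[tuple[int, int]] = []) -> tuple[int, int]: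
--     if not start_stops:
--         raise Exception("No lowest or biggest stop")
--     by_start = sorted(start_stops, key=lambda p: p[0])
--     by_stop_desc = sorted(start_stops, key=lambda p: p[1], reverse=True)
--     return (by_start[0][0], by_stop_desc[0][1])
-- ===== Notes on version B (the rewrite author's own statement) =====
-- stated objective: alternative
-- what changed: Replaces the fused single-pass loop with Option sentinels by sort-then-pick selection: sort ascending by start and take the first element's start, sort descending by stop and take the first element's stop.
import Mathlib
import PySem

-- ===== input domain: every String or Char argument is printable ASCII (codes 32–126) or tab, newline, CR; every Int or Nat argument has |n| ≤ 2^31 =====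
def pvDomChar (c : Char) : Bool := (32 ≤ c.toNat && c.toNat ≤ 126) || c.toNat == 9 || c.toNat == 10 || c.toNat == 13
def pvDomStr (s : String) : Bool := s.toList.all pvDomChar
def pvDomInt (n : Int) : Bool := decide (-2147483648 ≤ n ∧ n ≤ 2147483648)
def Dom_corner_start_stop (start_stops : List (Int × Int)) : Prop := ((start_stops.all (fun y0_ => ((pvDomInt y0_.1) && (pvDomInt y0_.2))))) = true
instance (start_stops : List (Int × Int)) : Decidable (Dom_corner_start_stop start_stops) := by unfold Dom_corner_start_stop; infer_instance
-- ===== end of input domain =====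

-- B replaces A's fused one-pass loop with Option sentinels by sort-then-pick selection
-- (sort ascending by start, take the first; sort descending by stop, take the first) — alternative.
-- A raises on the empty list; Pre_ excludes it.

-- ===== PORT A =====
-- loop body of A: update the two Option sentinels
def pvStepA (acc : Option Int × Option Int) (p : Int × Int) : Option Int × Option Int :=
  let lower := match acc.1 with
    | none => some p.1
    | some l => if p.1 < l then some p.1 else some l
  let biggest := match acc.2 with
    | none => some p.2
    | some b => if p.2 > b then some p.2 else some b
  (lower, biggest)

def corner_start_stop (start_stops : List (Int × Int)) : Int × Int :=
  match start_stops.foldl pvStepA (none, none) with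
  | (some l, some b) => (l, b)
  | _ => (0, 0)  -- A raises here; excluded by Pre_

-- ===== PORT B =====
def corner_start_stop_alt (start_stops : List (Int × Int)) : Int × Int :=
  -- B raises on the empty list (excluded by Pre_); pyGet? is none there and we default
  let by_start := PySem.List.sorted start_stops (fun p => p.1) false
  let by_stop_desc := PySem.List.sorted start_stops (fun p => p.2) true
  (((PySem.List.pyGet? by_start 0).getD (0, 0)).1,
   ((PySem.List.pyGet? by_stop_desc 0).getD (0, 0)).2)

-- ===== PRECONDITION & SPEC =====
-- A raises Exception("No lowest or biggest stop") on the empty list; excluded.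
def Pre_corner_start_stop (start_stops : List (Int × Int)) : Prop := start_stops ≠ []
instance (start_stops : List (Int × Int)) : Decidable (Pre_corner_start_stop start_stops) := by unfold Pre_corner_start_stop; infer_instance
def pvWitness_corner_start_stop : (List (Int × Int)) := [(1, 2), (0, 5)]
def Spec_corner_start_stop (start_stops : List (Int × Int)) (out : Int × Int) : Prop := out = corner_start_stop_alt start_stops
instance (start_stops : List (Int × Int)) (out : Int × Int) : Decidable (Spec_corner_start_stop start_stops out) := by unfold Spec_corner_start_stop; infer_instance

-- ===== CLAIM (what is proved, stated in full; the proofs are below) =====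
def Claim_equal_corner_start_stop : Prop := ∀ (start_stops : List (Int × Int)), Dom_corner_start_stop start_stops → Pre_corner_start_stop start_stops → Spec_corner_start_stop start_stops (corner_start_stop start_stops)

-- ===== LEMMAS AND PROOFS =====

theorem step_some (a b : Int) (x : Int × Int) :
    pvStepA (some a, some b) x = (some (min a x.1), some (max b x.2)) := by
  unfold pvStepA
  simp only [min_def, max_def]
  split_ifs <;> simp_all <;> omega

theorem fold_some (t : List (Int × Int)) (a b : Int) :
    t.foldl pvStepA (some a, some b)
    = (some ((t.map Prod.fst).foldl min a), some ((t.map Prod.snd).foldl max b)) := by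
  induction t generalizing a b with
  | nil => simp
  | cons x t ih => simp only [List.foldl_cons, List.map_cons, step_some, ih]

-- the running-min loop of A computes the unique minimum value of the starts
theorem foldl_min_fst (x : Int × Int) (t : List (Int × Int)) :
    PySem.List.min? ((x :: t).map Prod.fst) (fun y => y)
      = some ((t.map Prod.fst).foldl min x.1) := by
  simpa using PySem.List.min?_id_cons (x := x.1) (t := t.map Prod.fst)

theorem foldl_max_snd (x : Int × Int) (t : List (Int × Int)) :
    PySem.List.max? ((x :: t).map Prod.snd) (fun y => y)
      = some ((t.map Prod.snd).foldl max x.2) := by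
  simpa using PySem.List.max?_id_cons (x := x.2) (t := t.map Prod.snd)

theorem pyGet?_zero {α : Type} (h : α) (r : List α) :
    PySem.List.pyGet? (h :: r) 0 = some h := by
  simp [PySem.List.pyGet?, PySem.List.pyIdx?]

theorem corner_start_stop_spec : Claim_equal_corner_start_stop := by
  intro xs _ hpre
  unfold Spec_corner_start_stop corner_start_stop corner_start_stop_alt
  cases xs with
  | nil => exact absurd rfl hpre
  | cons x t =>
      simp only [List.foldl_cons]
      have hfirst : pvStepA (none, none) x = (some x.1, some x.2) := by
        simp [pvStepA]
      rw [hfirst, fold_some]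
      -- name the two sorted lists and peel their heads
      rcases hs : PySem.List.sorted (x :: t) (fun p => p.1) false with _ | ⟨h1, r1⟩
      · exact absurd ((PySem.List.sorted_eq_nil_iff _ _ _).mp hs) (by simp)
      rcases hr : PySem.List.sorted (x :: t) (fun p => p.2) true with _ | ⟨h2, r2⟩
      · exact absurd ((PySem.List.sorted_eq_nil_iff _ _ _).mp hr) (by simp)
      simp only [pyGet?_zero, Option.getD_some]
      -- the min fold
      have hmin := foldl_min_fst x t
      have hm_mem := PySem.List.min?_mem hmin
      have hm_min := PySem.List.min?_isMin hmin
      have hh1 : h1 ∈ (x :: t) := by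
        have := PySem.List.mem_sorted (x :: t) (fun p => p.1) false h1
        rw [hs] at this; exact this.mp List.mem_cons_self
      have hlead1 := PySem.List.key_head_sorted_le _ _ hs
      have e1 : h1.1 = (t.map Prod.fst).foldl min x.1 := by
        apply le_antisymm
        · obtain ⟨z, hz, hze⟩ := List.mem_map.mp hm_mem
          exact hze ▸ hlead1 z hz
        · exact hm_min h1.1 (List.mem_map.mpr ⟨h1, hh1, rfl⟩)
      -- the max fold
      have hmax := foldl_max_snd x t
      have hM_mem := PySem.List.max?_mem hmax
      have hM_max := PySem.List.max?_isMax hmax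
      have hh2 : h2 ∈ (x :: t) := by
        have := PySem.List.mem_sorted (x :: t) (fun p => p.2) true h2
        rw [hr] at this; exact this.mp List.mem_cons_self
      have hlead2 := PySem.List.key_head_sorted_rev_ge _ _ hr
      have e2 : h2.2 = (t.map Prod.snd).foldl max x.2 := by
        apply le_antisymm
        · exact hM_max h2.2 (List.mem_map.mpr ⟨h2, hh2, rfl⟩)
        · obtain ⟨z, hz, hze⟩ := List.mem_map.mp hM_mem
          exact hze ▸ hlead2 z hz
      simp [e1, e2]
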